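-- pv_equiv track=rewrite | github.com/rajesh196rsh/Iraitech | question2.py | nextNumber
-- ===== SOURCE A (Python) =====
-- def nextNumber(requiredElement):
--     firstElement = 2
--     firstDifference = 1
--     secondDifference = 7
--     iteratorDifference = 4
--     if requiredElement == 1:
--         return firstElement
--     else:
--         currentElement = firstElement
--         for i in range(2,requiredElement+1):
--             if i % 2 == 0:
--                 currentElement = currentElement + firstDifference
--                 firstDifference = firstDifference + iteratorDifference
--             else:
--                 currentElement = currentElement + secondDifference
--                 secondDifference = secondDifference + iteratorDifference
--         return currentElement
-- ===== SOURCE B (Python) =====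
-- def nextNumber(requiredElement):
--     # Closed form: even steps add 1,5,9,... and odd steps add 7,11,15,...
--     if requiredElement <= 1:
--         return 2
--     e = requiredElement // 2          # number of even i in 2..n
--     o = (requiredElement - 1) // 2    # number of odd i in 3..n
--     return 2 + e * (2 * e - 1) + o * (2 * o + 5)
-- ===== Notes on version B (the rewrite author's own statement) =====
-- stated objective: faster
-- what changed: Replaced the O(n) parity loop accumulating two growing differences by an O(1) closed form summing the two arithmetic progressions (even steps add 1,5,9,... and odd steps add 7,11,...) via floor divisions.
import Mathlib
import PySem

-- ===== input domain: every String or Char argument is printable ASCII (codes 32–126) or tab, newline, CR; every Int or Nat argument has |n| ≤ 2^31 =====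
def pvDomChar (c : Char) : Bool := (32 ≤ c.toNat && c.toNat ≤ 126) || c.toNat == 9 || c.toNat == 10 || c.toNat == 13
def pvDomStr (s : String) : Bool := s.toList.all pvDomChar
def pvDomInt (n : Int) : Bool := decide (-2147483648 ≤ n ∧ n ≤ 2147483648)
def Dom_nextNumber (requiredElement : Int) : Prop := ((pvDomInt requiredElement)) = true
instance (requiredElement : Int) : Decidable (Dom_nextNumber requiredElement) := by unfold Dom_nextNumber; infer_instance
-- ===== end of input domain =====

-- B replaces A's O(n) accumulation loop by an O(1) closed form (sum of the two
-- arithmetic progressions of even- and odd-indexed differences).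

-- ===== PORT A =====
-- literal transliteration: the for-loop is a foldl over range(2, n+1) carrying
-- (currentElement, firstDifference, secondDifference)
def nextNumber (requiredElement : Int) : Int :=
  let firstElement : Int := 2
  let firstDifference : Int := 1
  let secondDifference : Int := 7
  let iteratorDifference : Int := 4
  if requiredElement = 1 then firstElement
  else
    let st := (PySem.List.pyRange 2 (requiredElement + 1) 1).foldl
      (fun (s : Int × Int × Int) (i : Int) =>
        if PySem.Int.mod i 2 = 0 then
          (s.1 + s.2.1, s.2.1 + iteratorDifference, s.2.2)
        else
          (s.1 + s.2.2, s.2.1, s.2.2 + iteratorDifference))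
      (firstElement, firstDifference, secondDifference)
    st.1

-- ===== PORT B =====
def nextNumber_alt (requiredElement : Int) : Int :=
  if requiredElement ≤ 1 then 2
  else
    let e := PySem.Int.floordiv requiredElement 2
    let o := PySem.Int.floordiv (requiredElement - 1) 2
    2 + e * (2 * e - 1) + o * (2 * o + 5)

-- ===== PRECONDITION & SPEC =====
def Spec_nextNumber (requiredElement : Int) (out : Int) : Prop := out = nextNumber_alt requiredElement
instance (requiredElement : Int) (out : Int) : Decidable (Spec_nextNumber requiredElement out) := by unfold Spec_nextNumber; infer_instance

-- ===== CLAIM (what is proved, stated in full; the proofs are below) =====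
def Claim_equal_nextNumber : Prop := ∀ (requiredElement : Int), Dom_nextNumber requiredElement → Spec_nextNumber requiredElement (nextNumber requiredElement)

-- ===== LEMMAS AND PROOFS =====

-- A's loop body, as in the port
def pvStep (s : Int × Int × Int) (i : Int) : Int × Int × Int :=
  if PySem.Int.mod i 2 = 0 then (s.1 + s.2.1, s.2.1 + 4, s.2.2)
  else (s.1 + s.2.2, s.2.1, s.2.2 + 4)

-- invariant: after processing i = 2 .. m+1 the state is the closed form,
-- with E = (m+1)/2 even indices and O = m/2 odd indices consumed
theorem pvLoop_closed (m : Nat) :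
    (PySem.List.pyRange 2 ((m : Int) + 2) 1).foldl pvStep (2, 1, 7) =
      (2 + (((m + 1) / 2 : Nat) : Int) * (2 * (((m + 1) / 2 : Nat) : Int) - 1)
         + ((m / 2 : Nat) : Int) * (2 * ((m / 2 : Nat) : Int) + 5),
       1 + 4 * (((m + 1) / 2 : Nat) : Int),
       7 + 4 * ((m / 2 : Nat) : Int)) := by
  induction m with
  | zero =>
      simp [PySem.List.pyRange]
  | succ m ih =>
      have hrw : (PySem.List.pyRange 2 ((↑(m + 1) : Int) + 2) 1)
          = PySem.List.pyRange 2 ((m : Int) + 2) 1 ++ [(m : Int) + 2] := by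
        have := PySem.List.pyRange_one_succ_right (a := 2) (b := (m : Int) + 2) (by omega)
        simpa [show ((↑(m + 1) : Int) + 2) = ((m : Int) + 2) + 1 by push_cast; ring] using this
      rw [hrw, List.foldl_append, ih]
      have hmod : PySem.Int.mod ((m : Int) + 2) 2 = ((m : Int) + 2) % 2 :=
        PySem.Int.mod_eq_emod_of_pos (by omega)
      rcases Nat.even_or_odd m with ⟨k, hk⟩ | ⟨k, hk⟩
      · -- m = 2k : index m+2 is even
        subst hk
        have h0 : PySem.Int.mod ((↑(k + k) : Int) + 2) 2 = 0 := by
          rw [hmod]; omega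
        simp only [List.foldl_cons, List.foldl_nil, pvStep, h0]
        have e1 : (k + k + 1) / 2 = k := by omega
        have e2 : (k + k) / 2 = k := by omega
        have e3 : (k + k + 1 + 1) / 2 = k + 1 := by omega
        rw [e1, e2, e3]
        push_cast
        refine Prod.ext ?_ (Prod.ext ?_ ?_) <;> simp <;> ring
      · -- m = 2k+1 : index m+2 is odd
        subst hk
        have h0 : ¬ PySem.Int.mod ((↑(2 * k + 1) : Int) + 2) 2 = 0 := by
          rw [hmod]; omega
        simp only [List.foldl_cons, List.foldl_nil, pvStep, h0]
        have e1 : (2 * k + 1 + 1) / 2 = k + 1 := by omega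
        have e2 : (2 * k + 1) / 2 = k := by omega
        have e3 : (2 * k + 1 + 1 + 1) / 2 = k + 1 := by omega
        rw [e1, e2, e3]
        push_cast
        refine Prod.ext ?_ (Prod.ext ?_ ?_) <;> simp <;> ring

-- ===== VERDICT (by name: the statement is the Claim_ definition above) =====
theorem nextNumber_spec : Claim_equal_nextNumber := by
  intro n _
  unfold Spec_nextNumber nextNumber nextNumber_alt
  by_cases h1 : n = 1
  · subst h1; norm_num
  · simp only [if_neg h1]
    by_cases hle : n ≤ 1
    · -- the loop range is empty
      have hemp : PySem.List.pyRange 2 (n + 1) 1 = [] := by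
        have : (n + 1 - 2).toNat = 0 := by omega
        simp [PySem.List.pyRange_one, this]
      simp [hemp, hle]
    · -- n ≥ 2 : use the closed-form invariant with m = (n-1).toNat
      have hn2 : 2 ≤ n := by omega
      set m : Nat := (n - 1).toNat with hm
      have hn : n = (m : Int) + 1 := by omega
      have hrange : n + 1 = (m : Int) + 2 := by omega
      rw [hrange]
      have := pvLoop_closed m
      show ((PySem.List.pyRange 2 ((m : Int) + 2) 1).foldl
        (fun (s : Int × Int × Int) (i : Int) =>
          if PySem.Int.mod i 2 = 0 then (s.1 + s.2.1, s.2.1 + 4, s.2.2)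
          else (s.1 + s.2.2, s.2.1, s.2.2 + 4)) (2, 1, 7)).1 = _
      rw [show (fun (s : Int × Int × Int) (i : Int) =>
          if PySem.Int.mod i 2 = 0 then (s.1 + s.2.1, s.2.1 + 4, s.2.2)
          else (s.1 + s.2.2, s.2.1, s.2.2 + 4)) = pvStep from rfl, this]
    -- now connect the Nat divisions with B's floordivs
      have he : PySem.Int.floordiv n 2 = (((m + 1) / 2 : Nat) : Int) := by
        rw [PySem.Int.floordiv_eq_ediv_of_pos (by omega)]; omega
      have ho : PySem.Int.floordiv (n - 1) 2 = ((m / 2 : Nat) : Int) := by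
        rw [PySem.Int.floordiv_eq_ediv_of_pos (by omega)]; omega
      simp only [if_neg hle, he, ho]
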